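-- pv_equiv track=rewrite | github.com/WhiteRose404/leet-code | solution.py | attempt
-- ===== SOURCE A (Python) =====
-- def attempt(ratings) -> int:
--     s = [1] * len(ratings);
--     flag = True;
--     while(flag):
--         flag = False;
--         for j in range(len(ratings)):
--             if( j != len(ratings) - 1):
--                 if(ratings[j] > ratings[j+1] and s[j] <= s[j+1]):
--                     s[j] = s[j+1] + 1
--                     flag = True
--             if(j and ratings[j] > ratings[j-1] and s[j] <= s[j-1]):
--                     s[j] = s[j-1] + 1
--                     flag = True
--     return sum(s)
-- ===== SOURCE B (Python) =====
-- def attempt(ratings) -> int: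
--     n = len(ratings)
--     if n == 0:
--         return 0
--     candies = [1] * n
--     for j in range(1, n):
--         if ratings[j] > ratings[j - 1]:
--             candies[j] = candies[j - 1] + 1
--     total = candies[n - 1]
--     right = 1
--     for j in reversed(range(n - 1)):
--         if ratings[j] > ratings[j + 1]:
--             right = right + 1
--         else:
--             right = 1
--         total += max(candies[j], right)
--     return total
-- ===== Notes on version B (the rewrite author's own statement) =====
-- stated objective: faster
-- what changed: Replaced A's repeat-until-no-change relaxation over the whole array (a fixed-point iteration of neighbor updates) with the standard two-pass candy algorithm: one left-to-right pass building increasing-run lengths, one right-to-left pass combining with the decreasing-run length via max.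
import Mathlib
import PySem

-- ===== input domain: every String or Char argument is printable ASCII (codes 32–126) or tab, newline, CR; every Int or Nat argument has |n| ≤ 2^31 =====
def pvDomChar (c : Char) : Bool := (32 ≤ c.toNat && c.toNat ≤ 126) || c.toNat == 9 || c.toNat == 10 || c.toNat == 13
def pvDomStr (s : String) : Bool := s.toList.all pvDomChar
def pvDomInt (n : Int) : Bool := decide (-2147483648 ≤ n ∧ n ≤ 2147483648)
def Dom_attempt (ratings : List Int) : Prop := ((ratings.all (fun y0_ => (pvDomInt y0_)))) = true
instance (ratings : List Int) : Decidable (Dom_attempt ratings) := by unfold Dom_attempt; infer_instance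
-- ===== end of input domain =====

-- B replaces A's O(n^2) repeat-until-stable neighbor relaxation with the standard O(n) two-pass max algorithm.

-- ===== PORT A =====
-- one iteration j of the inner `for` loop: both `if`s, threading the mutable list s and the flag
def attemptStep (r : List Int) (st : List Int × Bool) (j : Nat) : List Int × Bool :=
  let s := st.1
  let flag := st.2
  let st1 : List Int × Bool :=
    if j ≠ r.length - 1 then
      if r.getD j 0 > r.getD (j+1) 0 ∧ s.getD j 0 ≤ s.getD (j+1) 0 then
        (s.set j (s.getD (j+1) 0 + 1), true)
      else (s, flag)
    else (s, flag)
  if j ≠ 0 ∧ r.getD j 0 > r.getD (j-1) 0 ∧ st1.1.getD j 0 ≤ st1.1.getD (j-1) 0 then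
    (st1.1.set j (st1.1.getD (j-1) 0 + 1), true)
  else st1

-- the `while(flag)` loop; fuel only makes it total, length^2+1 passes are proved sufficient below
def attemptLoop (r : List Int) : Nat → List Int → List Int
  | 0, s => s
  | fuel+1, s =>
    let p := (List.range r.length).foldl (attemptStep r) (s, false)
    if p.2 then attemptLoop r fuel p.1 else p.1

def attempt (ratings : List Int) : Int :=
  (attemptLoop ratings (ratings.length * ratings.length + 1)
    (List.replicate ratings.length 1)).sum

-- ===== PORT B =====
def attempt_alt (ratings : List Int) : Int :=
  let n := ratings.length
  if n = 0 then 0 else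
  let candies := (List.range' 1 (n-1)).foldl
    (fun c j => if ratings.getD j 0 > ratings.getD (j-1) 0 then c.set j (c.getD (j-1) 0 + 1) else c)
    (List.replicate n 1)
  let p := ((List.range (n-1)).reverse).foldl
    (fun (tr : Int × Int) j =>
      let right := if ratings.getD j 0 > ratings.getD (j+1) 0 then tr.2 + 1 else 1
      (tr.1 + max (candies.getD j 0) right, right))
    (candies.getD (n-1) 0, 1)
  p.1

-- ===== PRECONDITION & SPEC =====
def Spec_attempt (ratings : List Int) (out : Int) : Prop := out = attempt_alt ratings
instance (ratings : List Int) (out : Int) : Decidable (Spec_attempt ratings out) := by unfold Spec_attempt; infer_instance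

-- ===== CLAIM (what is proved, stated in full; the proofs are below) =====
def Claim_equal_attempt : Prop := ∀ (ratings : List Int), Dom_attempt ratings → Spec_attempt ratings (attempt ratings)

-- ===== LEMMAS AND PROOFS =====

-- L j = length of the longest strictly increasing run of ratings ending at j
def Lf (r : List Int) : Nat → Int
  | 0 => 1
  | j+1 => if r.getD (j+1) 0 > r.getD j 0 then Lf r j + 1 else 1

-- R j = length of the longest strictly decreasing run of ratings starting at j
def Rf (r : List Int) (j : Nat) : Int :=
  if _h : j + 1 < r.length then
    (if r.getD j 0 > r.getD (j+1) 0 then Rf r (j+1) + 1 else 1)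
  else 1
termination_by r.length - j

-- the canonical (least) candy assignment
def Bf (r : List Int) (j : Nat) : Int := max (Lf r j) (Rf r j)

def Bsum (r : List Int) : Int := ((List.range r.length).map (Bf r)).sum

lemma Rf_unfold (r : List Int) (j : Nat) (h : j + 1 < r.length) :
    Rf r j = if r.getD j 0 > r.getD (j+1) 0 then Rf r (j+1) + 1 else 1 := by
  rw [Rf]; simp [h]

lemma Rf_last (r : List Int) (j : Nat) (h : ¬ j + 1 < r.length) : Rf r j = 1 := by
  rw [Rf]; simp [h]

lemma Lf_pos (r : List Int) (j : Nat) : 1 ≤ Lf r j := by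
  cases j with
  | zero => simp [Lf]
  | succ i =>
    simp only [Lf]; split_ifs with h
    · have := Lf_pos r i; omega
    · omega

lemma Rf_pos (r : List Int) (j : Nat) : 1 ≤ Rf r j := by
  by_cases h : j + 1 < r.length
  · rw [Rf_unfold r j h]; split_ifs with h2
    · have := Rf_pos r (j+1); omega
    · omega
  · rw [Rf_last r j h]
termination_by r.length - j
decreasing_by omega

lemma Bf_pos (r : List Int) (j : Nat) : 1 ≤ Bf r j :=
  le_trans (Lf_pos r j) (le_max_left _ _)

lemma Lf_le (r : List Int) (j : Nat) : Lf r j ≤ (j : Int) + 1 := by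
  induction j with
  | zero => simp [Lf]
  | succ i ih =>
    simp only [Lf]; split_ifs with h
    · push_cast; omega
    · push_cast
      omega

lemma Rf_le (r : List Int) (j : Nat) (hj : j < r.length) :
    Rf r j ≤ (r.length : Int) - j := by
  by_cases h : j + 1 < r.length
  · rw [Rf_unfold r j h]
    have := Rf_le r (j+1) h
    split_ifs with h2 <;> push_cast at * <;> omega
  · rw [Rf_last r j h]
    have : (j:Int) + 1 ≤ r.length := by exact_mod_cast hj
    omega
termination_by r.length - j
decreasing_by omega

lemma Bf_le (r : List Int) (j : Nat) (hj : j < r.length) : Bf r j ≤ (r.length : Int) := by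
  have h1 := Lf_le r j
  have h2 := Rf_le r j hj
  have : (j : Int) + 1 ≤ r.length := by exact_mod_cast hj
  simp only [Bf, max_le_iff]; omega

-- descent: a strictly greater left neighbor needs strictly more candies
lemma Bf_desc (r : List Int) (j : Nat) (h1 : j + 1 < r.length)
    (h2 : r.getD j 0 > r.getD (j+1) 0) : Bf r (j+1) + 1 ≤ Bf r j := by
  have hR : Rf r j = Rf r (j+1) + 1 := by rw [Rf_unfold r j h1, if_pos h2]
  have hL1 : Lf r (j+1) = 1 := by
    simp only [Lf]; rw [if_neg]; omega
  have hRj := le_max_right (Lf r j) (Rf r j)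
  have hRp := Rf_pos r (j+1)
  simp only [Bf, hL1] at *
  rw [max_eq_right hRp]
  omega

-- ascent: a strictly greater right neighbor needs strictly more candies
lemma Bf_asc (r : List Int) (j : Nat) (h1 : j + 1 < r.length)
    (h2 : r.getD (j+1) 0 > r.getD j 0) : Bf r j + 1 ≤ Bf r (j+1) := by
  have hL : Lf r (j+1) = Lf r j + 1 := by simp only [Lf]; rw [if_pos h2]
  have hR1 : Rf r j = 1 := by rw [Rf_unfold r j h1]; rw [if_neg]; omega
  have hLj := le_max_left (Lf r (j+1)) (Rf r (j+1))
  have hLp := Lf_pos r j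
  simp only [Bf, hR1] at *
  rw [max_eq_left hLp]
  omega

-- list access/update helpers
lemma getD_set_self (s : List Int) (j : Nat) (v : Int) (h : j < s.length) :
    (s.set j v).getD j 0 = v := by
  simp [List.getD_eq_getElem?_getD, h]

lemma getD_set_ne (s : List Int) (j k : Nat) (v : Int) (h : j ≠ k) :
    (s.set j v).getD k 0 = s.getD k 0 := by
  simp [List.getD_eq_getElem?_getD, h]

lemma sum_set_eq (s : List Int) (j : Nat) (v : Int) (h : j < s.length) :
    (s.set j v).sum = s.sum + v - s.getD j 0 := by
  induction s generalizing j with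
  | nil => simp at h
  | cons a t ih =>
    cases j with
    | zero => simp; ring
    | succ i =>
      simp only [List.set_cons_succ, List.sum_cons, List.getD_cons_succ]
      rw [ih i (by simpa using h)]; ring

lemma sum_eq_range (s : List Int) :
    s.sum = ((List.range s.length).map (fun j => s.getD j 0)).sum := by
  induction s with
  | nil => simp
  | cons a t ih =>
    simp only [List.length_cons, List.range_succ_eq_map, List.map_cons, List.map_map,
      List.sum_cons, List.getD_cons_zero]
    have : (List.range t.length).map ((fun j => (a :: t).getD j 0) ∘ Nat.succ)
        = (List.range t.length).map (fun j => t.getD j 0) := by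
      apply List.map_congr_left; intro i _; simp
    rw [this, ← ih]

-- the loop invariant of A: candidate candy counts stay between 1 and the canonical assignment
def InvA (r s : List Int) : Prop :=
  s.length = r.length ∧ ∀ j, j < r.length → 1 ≤ s.getD j 0 ∧ s.getD j 0 ≤ Bf r j

lemma inv_sum_le (r s : List Int) (hI : InvA r s) : s.sum ≤ Bsum r := by
  obtain ⟨hlen, hb⟩ := hI
  rw [sum_eq_range s, hlen, Bsum]
  exact List.sum_le_sum (fun i hi => (hb i (List.mem_range.mp hi)).2)

lemma Bsum_le (r : List Int) : Bsum r ≤ (r.length : Int) * r.length := by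
  have h : Bsum r ≤ ((List.range r.length).map (fun _ => (r.length : Int))).sum :=
    List.sum_le_sum (fun i hi => Bf_le r i (List.mem_range.mp hi))
  simpa [List.map_const', List.sum_replicate, mul_comm] using h

lemma Bsum_nonneg (r : List Int) : 0 ≤ Bsum r := by
  apply List.sum_nonneg
  intro x hx
  obtain ⟨i, _, rfl⟩ := List.mem_map.mp hx
  have := Bf_pos r i; omega

-- one in-range relaxation update preserves the invariant and strictly increases the sum
lemma upd_spec (r s : List Int) (j k : Nat) (hI : InvA r s) (hj : j < r.length)
    (hk : k < r.length) (hle : s.getD j 0 ≤ s.getD k 0) (hB : Bf r k + 1 ≤ Bf r j) :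
    InvA r (s.set j (s.getD k 0 + 1)) ∧ s.sum + 1 ≤ (s.set j (s.getD k 0 + 1)).sum := by
  obtain ⟨hlen, hb⟩ := hI
  have hjs : j < s.length := by omega
  refine ⟨⟨by simp [hlen], ?_⟩, ?_⟩
  · intro i hi
    by_cases hij : j = i
    · subst hij
      rw [getD_set_self s j _ hjs]
      have h1 := (hb k hk).1
      have h2 := (hb k hk).2
      exact ⟨by omega, by omega⟩
    · rw [getD_set_ne s j i _ hij]; exact hb i hi
  · rw [sum_set_eq s j _ hjs]; omega

lemma Bf_asc' (r : List Int) (j : Nat) (h0 : j ≠ 0) (h1 : j < r.length)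
    (h2 : r.getD j 0 > r.getD (j-1) 0) : Bf r (j-1) + 1 ≤ Bf r j := by
  obtain ⟨i, rfl⟩ : ∃ i, j = i + 1 := ⟨j - 1, by omega⟩
  simpa using Bf_asc r i (by omega) (by simpa using h2)

lemma step_spec (r s : List Int) (f : Bool) (j : Nat) (hj : j < r.length) (hI : InvA r s) :
    InvA r (attemptStep r (s, f) j).1 ∧ s.sum ≤ (attemptStep r (s, f) j).1.sum ∧
      ((attemptStep r (s, f) j).2 = true → f = true ∨ s.sum + 1 ≤ (attemptStep r (s, f) j).1.sum) := by
  simp only [attemptStep]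
  split_ifs with h1 h2 h3 h4 h5 <;> dsimp only
  -- case: both updates fire
  · have hj1 : j + 1 < r.length := by omega
    have hu1 := upd_spec r s j (j+1) hI hj hj1 h2.2 (Bf_desc r j hj1 h2.1)
    have hu2 := upd_spec r (s.set j (s.getD (j+1) 0 + 1)) j (j-1) hu1.1 hj (by omega)
      h3.2.2 (Bf_asc' r j h3.1 hj h3.2.1)
    exact ⟨hu2.1, by have := hu1.2; have := hu2.2; omega,
      fun _ => Or.inr (by have := hu1.2; have := hu2.2; omega)⟩
  -- case: only the first update fires
  · have hj1 : j + 1 < r.length := by omega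
    have hu1 := upd_spec r s j (j+1) hI hj hj1 h2.2 (Bf_desc r j hj1 h2.1)
    exact ⟨hu1.1, by have := hu1.2; omega, fun _ => Or.inr hu1.2⟩
  -- case: first guard true, first condition false, second fires
  · have hu := upd_spec r s j (j-1) hI hj (by omega) h4.2.2 (Bf_asc' r j h4.1 hj h4.2.1)
    exact ⟨hu.1, by have := hu.2; omega, fun _ => Or.inr hu.2⟩
  -- case: nothing fires
  · exact ⟨hI, le_refl _, fun h => Or.inl h⟩
  -- case: j = len-1, second fires
  · have hu := upd_spec r s j (j-1) hI hj (by omega) h5.2.2 (Bf_asc' r j h5.1 hj h5.2.1)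
    exact ⟨hu.1, by have := hu.2; omega, fun _ => Or.inr hu.2⟩
  -- case: j = len-1, nothing fires
  · exact ⟨hI, le_refl _, fun h => Or.inl h⟩

lemma step_flag (r s : List Int) (j : Nat) : (attemptStep r (s, true) j).2 = true := by
  simp only [attemptStep]
  split_ifs <;> rfl

lemma flag_stays (r : List Int) : ∀ (js : List Nat) (s : List Int),
    (js.foldl (attemptStep r) (s, true)).2 = true := by
  intro js
  induction js with
  | nil => intro s; rfl
  | cons j t ih =>
    intro s
    rcases hq : attemptStep r (s, true) j with ⟨s1, f1⟩
    have : f1 = true := by have := step_flag r s j; rw [hq] at this; exact this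
    subst this
    simp only [List.foldl_cons, hq]
    exact ih s1

lemma pass_spec (r : List Int) : ∀ (js : List Nat) (s : List Int) (f : Bool),
    (∀ j ∈ js, j < r.length) → InvA r s →
    InvA r (js.foldl (attemptStep r) (s, f)).1 ∧
      s.sum ≤ (js.foldl (attemptStep r) (s, f)).1.sum ∧
      ((js.foldl (attemptStep r) (s, f)).2 = true →
        f = true ∨ s.sum + 1 ≤ (js.foldl (attemptStep r) (s, f)).1.sum) := by
  intro js
  induction js with
  | nil => intro s f _ hI; exact ⟨hI, le_refl _, fun h => Or.inl h⟩
  | cons j t ih =>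
    intro s f hmem hI
    rcases hq : attemptStep r (s, f) j with ⟨s1, f1⟩
    have hstep := step_spec r s f j (hmem j (by simp)) hI
    rw [hq] at hstep
    obtain ⟨hI1, hsum1, hflag1⟩ := hstep
    have hI1' : InvA r s1 := hI1
    have hsum1' : s.sum ≤ s1.sum := hsum1
    have hflag1' : f1 = true → f = true ∨ s.sum + 1 ≤ s1.sum := hflag1
    have hrec := ih s1 f1 (fun x hx => hmem x (by simp [hx])) hI1'
    obtain ⟨hI2, hsum2, hflag2⟩ := hrec
    simp only [List.foldl_cons, hq]
    refine ⟨hI2, le_trans hsum1' hsum2, ?_⟩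
    intro hft
    rcases hflag2 hft with h | h
    · rcases hflag1' h with h' | h'
      · exact Or.inl h'
      · exact Or.inr (le_trans h' hsum2)
    · exact Or.inr (by omega)

lemma step_fix (r s : List Int) (j : Nat) (h : (attemptStep r (s, false) j).2 = false) :
    attemptStep r (s, false) j = (s, false) ∧
    ¬(j ≠ r.length - 1 ∧ r.getD j 0 > r.getD (j+1) 0 ∧ s.getD j 0 ≤ s.getD (j+1) 0) ∧
    ¬(j ≠ 0 ∧ r.getD j 0 > r.getD (j-1) 0 ∧ s.getD j 0 ≤ s.getD (j-1) 0) := by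
  simp only [attemptStep] at h ⊢
  split_ifs at h ⊢ with h1 h2 h3 h4 h5 <;> dsimp only at h ⊢
  all_goals dsimp only at *
  all_goals refine ⟨rfl, ?_, ?_⟩ <;> tauto

lemma pass_fix (r : List Int) : ∀ (js : List Nat) (s : List Int),
    (js.foldl (attemptStep r) (s, false)).2 = false →
    (js.foldl (attemptStep r) (s, false)).1 = s ∧ ∀ j ∈ js,
      ¬(j ≠ r.length - 1 ∧ r.getD j 0 > r.getD (j+1) 0 ∧ s.getD j 0 ≤ s.getD (j+1) 0) ∧
      ¬(j ≠ 0 ∧ r.getD j 0 > r.getD (j-1) 0 ∧ s.getD j 0 ≤ s.getD (j-1) 0) := by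
  intro js
  induction js with
  | nil => intro s _; exact ⟨rfl, by simp⟩
  | cons j t ih =>
    intro s h
    rcases hq : attemptStep r (s, false) j with ⟨s1, f1⟩
    simp only [List.foldl_cons, hq] at h ⊢
    cases f1 with
    | true => rw [flag_stays r t s1] at h; simp at h
    | false =>
      have hsf := step_fix r s j (by rw [hq])
      rw [hq] at hsf
      obtain ⟨heq, hc1, hc2⟩ := hsf
      have hs1 : s1 = s := congrArg Prod.fst heq
      rw [hs1] at h ⊢
      obtain ⟨hfix, hall⟩ := ih s h
      refine ⟨hfix, ?_⟩
      intro i hi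
      rcases List.mem_cons.mp hi with hi' | hi'
      · subst hi'; exact ⟨hc1, hc2⟩
      · exact hall i hi'

-- minimality: any assignment satisfying the constraints dominates Lf
lemma ge_Lf (r s : List Int)
    (hpos : ∀ j, j < r.length → 1 ≤ s.getD j 0)
    (hasc : ∀ j, j + 1 < r.length → r.getD (j+1) 0 > r.getD j 0 → s.getD j 0 + 1 ≤ s.getD (j+1) 0) :
    ∀ j, j < r.length → Lf r j ≤ s.getD j 0 := by
  intro j
  induction j with
  | zero => intro hj; simpa [Lf] using hpos 0 hj
  | succ i ih =>
    intro hj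
    simp only [Lf]; split_ifs with h
    · have := ih (by omega)
      have := hasc i hj h
      omega
    · exact hpos (i+1) hj

lemma ge_Rf (r s : List Int)
    (hpos : ∀ j, j < r.length → 1 ≤ s.getD j 0)
    (hdesc : ∀ j, j + 1 < r.length → r.getD j 0 > r.getD (j+1) 0 → s.getD (j+1) 0 + 1 ≤ s.getD j 0) :
    ∀ (k j : Nat), r.length - j ≤ k → j < r.length → Rf r j ≤ s.getD j 0 := by
  intro k
  induction k with
  | zero => intro j hk hj; omega
  | succ m ih =>
    intro j hk hj
    by_cases h : j + 1 < r.length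
    · rw [Rf_unfold r j h]
      split_ifs with h2
      · have := ih (j+1) (by omega) h
        have := hdesc j h h2
        omega
      · exact hpos j hj
    · rw [Rf_last r j h]; exact hpos j hj

lemma fix_sum (r s : List Int) (hI : InvA r s)
    (hc : ∀ j, j < r.length →
      ¬(j ≠ r.length - 1 ∧ r.getD j 0 > r.getD (j+1) 0 ∧ s.getD j 0 ≤ s.getD (j+1) 0) ∧
      ¬(j ≠ 0 ∧ r.getD j 0 > r.getD (j-1) 0 ∧ s.getD j 0 ≤ s.getD (j-1) 0)) :
    s.sum = Bsum r := by
  obtain ⟨hlen, hb⟩ := hI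
  have hpos : ∀ j, j < r.length → 1 ≤ s.getD j 0 := fun j hj => (hb j hj).1
  have hdesc : ∀ j, j + 1 < r.length → r.getD j 0 > r.getD (j+1) 0 →
      s.getD (j+1) 0 + 1 ≤ s.getD j 0 := by
    intro j hj hr
    have := (hc j (by omega)).1
    have hne : j ≠ r.length - 1 := by omega
    omega
  have hasc : ∀ j, j + 1 < r.length → r.getD (j+1) 0 > r.getD j 0 →
      s.getD j 0 + 1 ≤ s.getD (j+1) 0 := by
    intro j hj hr
    have := (hc (j+1) hj).2
    simp only [Nat.add_sub_cancel] at this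
    have hne : j + 1 ≠ 0 := by omega
    omega
  have heq : ∀ j, j < r.length → s.getD j 0 = Bf r j := by
    intro j hj
    have h1 := (hb j hj).2
    have h2 := ge_Lf r s hpos hasc j hj
    have h3 := ge_Rf r s hpos hdesc r.length j (by omega) hj
    simp only [Bf] at *
    omega
  rw [sum_eq_range s, hlen, Bsum]
  congr 1
  apply List.map_congr_left
  intro i hi
  exact heq i (List.mem_range.mp hi)

lemma loop_spec (r : List Int) : ∀ (fuel : Nat) (s : List Int), InvA r s →
    (Bsum r - s.sum).toNat < fuel → (attemptLoop r fuel s).sum = Bsum r := by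
  intro fuel
  induction fuel with
  | zero => intro s hI h; omega
  | succ m ih =>
    intro s hI h
    rcases hq : (List.range r.length).foldl (attemptStep r) (s, false) with ⟨s1, f1⟩
    have hpass := pass_spec r (List.range r.length) s false
      (fun j hj => List.mem_range.mp hj) hI
    rw [hq] at hpass
    obtain ⟨hI1, hsum1, hflag1⟩ := hpass
    have hI1' : InvA r s1 := hI1
    have hflag1' : f1 = true → false = true ∨ s.sum + 1 ≤ s1.sum := hflag1
    simp only [attemptLoop, hq]
    cases f1 with
    | false =>
      simp only [Bool.false_eq_true, if_false]
      have hfix := pass_fix r (List.range r.length) s (by rw [hq])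
      rw [hq] at hfix
      obtain ⟨heq, hall⟩ := hfix
      have hs1 : s1 = s := heq
      rw [hs1]
      exact fix_sum r s hI (fun j hj => hall j (List.mem_range.mpr hj))
    | true =>
      simp only [if_true]
      apply ih s1 hI1'
      have hinc : s.sum + 1 ≤ s1.sum := by
        rcases hflag1' rfl with h' | h'
        · simp at h'
        · exact h'
      have hle := inv_sum_le r s1 hI1'
      omega

lemma attempt_eq (r : List Int) : attempt r = Bsum r := by
  unfold attempt
  apply loop_spec
  · refine ⟨by simp, ?_⟩
    intro j hj
    have h1 : (List.replicate r.length (1 : Int)).getD j 0 = 1 := by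
      simp [List.getD_eq_getElem?_getD, hj]
    rw [h1]
    exact ⟨le_refl _, Bf_pos r j⟩
  · have hs : (List.replicate r.length (1 : Int)).sum = (r.length : Int) := by
      simp [List.sum_replicate]
    rw [hs]
    have h1 := Bsum_le r
    have h2 := Bsum_nonneg r
    have h3 : (0 : Int) ≤ (r.length : Int) := by positivity
    omega

-- ===== B side =====

lemma cand_spec (r : List Int) : ∀ (m : Nat), m + 1 ≤ r.length →
    ((List.range' 1 m).foldl
      (fun c j => if r.getD j 0 > r.getD (j-1) 0 then c.set j (c.getD (j-1) 0 + 1) else c)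
      (List.replicate r.length (1:Int))).length = r.length ∧
    (∀ j, j < r.length →
      ((List.range' 1 m).foldl
        (fun c j => if r.getD j 0 > r.getD (j-1) 0 then c.set j (c.getD (j-1) 0 + 1) else c)
        (List.replicate r.length (1:Int))).getD j 0 = if j ≤ m then Lf r j else 1) := by
  intro m
  induction m with
  | zero =>
    intro _
    simp only [List.range'_zero, List.foldl_nil]
    refine ⟨by simp, ?_⟩
    intro j hj
    have h1 : (List.replicate r.length (1 : Int)).getD j 0 = 1 := by
      simp [List.getD_eq_getElem?_getD, hj]
    rw [h1]
    split_ifs with h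
    · interval_cases j
      simp [Lf]
    · rfl
  | succ m ih =>
    intro hm
    obtain ⟨hlen, hget⟩ := ih (by omega)
    have hrange : List.range' 1 (m+1) = List.range' 1 m ++ [m+1] := by
      rw [List.range'_concat]; simp [Nat.add_comm]
    rw [hrange, List.foldl_append]
    simp only [List.foldl_cons, List.foldl_nil, Nat.add_sub_cancel]
    set c := (List.range' 1 m).foldl
      (fun c j => if r.getD j 0 > r.getD (j-1) 0 then c.set j (c.getD (j-1) 0 + 1) else c)
      (List.replicate r.length (1:Int)) with hc
    have hcm : c.getD m 0 = Lf r m := by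
      rw [hget m (by omega)]; simp
    split_ifs with h
    · refine ⟨by simp [hlen], ?_⟩
      intro j hj
      by_cases hjm : j = m + 1
      · subst hjm
        rw [getD_set_self c (m+1) _ (by omega), hcm]
        rw [if_pos (le_refl _)]
        simp only [Lf]
        rw [if_pos h]
      · rw [getD_set_ne c (m+1) j _ (Ne.symm hjm), hget j hj]
        split_ifs with a b
        · rfl
        · omega
        · omega
        · rfl
    · refine ⟨hlen, ?_⟩
      intro j hj
      rw [hget j hj]
      split_ifs with a b
      · rfl
      · omega
      · have hj1 : j = m + 1 := by omega
        subst hj1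
        simp only [Lf]
        rw [if_neg h]
      · rfl

lemma rpass_spec (r : List Int) (candies : List Int)
    (hc : ∀ j, j < r.length → candies.getD j 0 = Lf r j) :
    ∀ (m : Nat), m < r.length → ∀ (t : Int),
    (((List.range m).reverse).foldl
      (fun (tr : Int × Int) j =>
        (tr.1 + max (candies.getD j 0) (if r.getD j 0 > r.getD (j+1) 0 then tr.2 + 1 else 1),
          if r.getD j 0 > r.getD (j+1) 0 then tr.2 + 1 else 1))
      (t, Rf r m)).1 = t + ((List.range m).map (Bf r)).sum := by
  intro m
  induction m with
  | zero => intro _ t; simp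
  | succ m ih =>
    intro hm t
    have hrev : (List.range (m+1)).reverse = m :: (List.range m).reverse := by
      rw [List.range_succ, List.reverse_append]; rfl
    have hr : (if r.getD m 0 > r.getD (m+1) 0 then Rf r (m+1) + 1 else 1) = Rf r m :=
      (Rf_unfold r m hm).symm
    rw [hrev, List.foldl_cons]
    dsimp only
    rw [hr, hc m (by omega)]
    have hBf : t + max (Lf r m) (Rf r m) = t + Bf r m := rfl
    rw [hBf, ih (by omega) (t + Bf r m)]
    rw [List.range_succ, List.map_append, List.sum_append]
    simp
    ring

lemma alt_eq (r : List Int) : attempt_alt r = Bsum r := by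
  by_cases hn : r.length = 0
  · simp [attempt_alt, hn, Bsum]
  · simp only [attempt_alt, if_neg hn]
    obtain ⟨hlen, hget⟩ := cand_spec r (r.length - 1) (by omega)
    set c := (List.range' 1 (r.length - 1)).foldl
      (fun c j => if r.getD j 0 > r.getD (j-1) 0 then c.set j (c.getD (j-1) 0 + 1) else c)
      (List.replicate r.length (1:Int)) with hcdef
    have hc : ∀ j, j < r.length → c.getD j 0 = Lf r j := by
      intro j hj
      rw [hget j hj, if_pos (by omega)]
    have h := rpass_spec r c hc (r.length - 1) (by omega) (Lf r (r.length - 1))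
    rw [Rf_last r (r.length - 1) (by omega)] at h
    rw [hc (r.length - 1) (by omega)]
    rw [h]
    obtain ⟨k, hk⟩ : ∃ k, r.length = k + 1 := ⟨r.length - 1, by omega⟩
    have hk1 : r.length - 1 = k := by omega
    rw [hk1, Bsum, hk]
    rw [List.range_succ, List.map_append, List.sum_append]
    have hBk : Bf r k = Lf r k := by
      rw [Bf, Rf_last r k (by omega), max_eq_left (Lf_pos r k)]
    simp [hBk]
    ring

-- ===== VERDICT (by name: the statement is the Claim_ definition above) =====
theorem attempt_spec : Claim_equal_attempt := by
  intro r _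
  unfold Spec_attempt
  rw [attempt_eq, alt_eq]
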